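-- pv_equiv track=rewrite | github.com/howardh0214/Algorithms-Homework | HW11/primefreq.py | primefreq
-- ===== SOURCE A (Python) =====
-- from collections import Counter
--
-- def primefreq(m):
--     ans = []
--     output = []
--     empty = 0
--     c = Counter(m)
--     for letter in c:
--         ans.append([letter, c[letter]])
--
--     for i in range(len(ans)):
--         if isPrime(ans[i][1]) is True:
--             output.append(ans[i][0])
--             empty = 1
--
--     output.sort()
--
--     if empty == 0:
--         return "Empty"
--
--
--
--     return ''.join(output)
--
-- def isPrime(n) :
--
--     if (n <= 1) :
--         return False
--     if (n <= 3) :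
--         return True
--
--     if (n % 2 == 0 or n % 3 == 0) :
--         return False
--
--     i = 5
--     while(i * i <= n) :
--         if (n % i == 0 or n % (i + 2) == 0) :
--             return False
--         i = i + 6
--
--     return True
-- ===== SOURCE B (Python) =====
-- from collections import Counter
--
-- def primefreq(m):
--     c = Counter(m)
--     out = [ch for ch in sorted(c)
--            if c[ch] > 1 and all(c[ch] % d for d in range(2, c[ch]))]
--     return ''.join(out) if out else "Empty"
-- ===== Notes on version B (the rewrite author's own statement) =====
-- stated objective: simpler
-- what changed: Replaces A's pair-list build, index loop with a found-flag, post-filter sort and wheel (6k+-1, sqrt-bounded) trial division by a single comprehension over the sorted Counter keys using plain full-range trial division (all(c % d for d in range(2, c))).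
import Mathlib
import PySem

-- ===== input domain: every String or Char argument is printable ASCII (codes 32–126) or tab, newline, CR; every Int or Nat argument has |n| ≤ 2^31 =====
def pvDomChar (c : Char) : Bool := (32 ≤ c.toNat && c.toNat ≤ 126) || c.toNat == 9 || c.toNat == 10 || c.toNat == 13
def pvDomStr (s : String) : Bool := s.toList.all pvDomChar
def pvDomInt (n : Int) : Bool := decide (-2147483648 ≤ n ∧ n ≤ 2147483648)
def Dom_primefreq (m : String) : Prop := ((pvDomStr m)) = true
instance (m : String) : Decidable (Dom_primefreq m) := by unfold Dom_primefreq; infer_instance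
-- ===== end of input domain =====

-- B replaces A's pair list, index loop with a found-flag and 6k±1 sqrt-bounded trial division
-- by one filter over the sorted Counter keys using plain full-range trial division (simpler, same cost class).

-- ===== PORT A =====

-- A's 'while (i*i <= n)' loop inside isPrime, i stepping by 6
def isPrimeLoopA (n i : Int) : Bool :=
  if _h : i * i ≤ n then
    if PySem.Int.mod n i == 0 || PySem.Int.mod n (i + 2) == 0 then false
    else isPrimeLoopA n (i + 6)
  else true
termination_by (n + 6 - i).toNat
decreasing_by
  have hn : (0:Int) ≤ n := le_trans (mul_self_nonneg i) _h
  rcases le_or_gt i 0 with hi | hi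
  · omega
  · have : i ≤ i * i := le_mul_of_one_le_left hi.le hi
    omega


def isPrime (n : Int) : Bool :=
  if n ≤ 1 then false
  else if n ≤ 3 then true
  else if PySem.Int.mod n 2 == 0 || PySem.Int.mod n 3 == 0 then false
  else isPrimeLoopA n 5


def primefreq (m : String) : String :=
  let c := PySem.Dict.counter m.toList
  let ans := c.keys.map (fun letter => (letter, c.getD letter 0))
  let st :=
    (PySem.List.pyRange 0 (ans.length : Int) 1).foldl
      (fun (st : List Char × Int) i =>
        if isPrime (PySem.List.pyGetD ans i (' ', 0)).2 = true then
          (st.1 ++ [(PySem.List.pyGetD ans i (' ', 0)).1], 1)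
        else st)
      ([], 0)
  let output := PySem.List.sorted st.1 (fun x => x) false
  if st.2 == 0 then "Empty"
  else PySem.Str.join "" (output.map (fun ch => String.ofList [ch]))


-- ===== PORT B =====

def primefreq_alt (m : String) : String :=
  let c := PySem.Dict.counter m.toList
  let out := (PySem.List.sorted c.keys (fun x => x) false).filter
      (fun ch => decide (1 < c.getD ch 0) &&
        (PySem.List.pyRange 2 (c.getD ch 0) 1).all
          (fun d => !(PySem.Int.mod (c.getD ch 0) d == 0)))
  if out.isEmpty then "Empty"
  else PySem.Str.join "" (out.map (fun ch => String.ofList [ch]))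


-- ===== PRECONDITION & SPEC =====
def Spec_primefreq (m : String) (out : String) : Prop := out = primefreq_alt m
instance (m : String) (out : String) : Decidable (Spec_primefreq m out) := by unfold Spec_primefreq; infer_instance

-- ===== CLAIM (what is proved, stated in full; the proofs are below) =====
def Claim_equal_primefreq : Prop := ∀ (m : String), Dom_primefreq m → Spec_primefreq m (primefreq m)

-- ===== LEMMAS AND PROOFS =====

-- A's wheel loop returns true iff no tested candidate (i, i+2, i ≡ start mod 6) divides n
theorem isPrimeLoopA_true_iff (n i : Int) (hi : 0 < i) :
    isPrimeLoopA n i = true ↔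
      ∀ j : Int, i ≤ j → (j - i) % 6 = 0 → j * j ≤ n → ¬ j ∣ n ∧ ¬ (j + 2) ∣ n := by
  induction i using isPrimeLoopA.induct (n := n) with
  | case1 i h hdiv =>
    rw [isPrimeLoopA, dif_pos h, if_pos hdiv]
    simp only [Bool.false_eq_true, false_iff]
    intro H
    rcases H i le_rfl (by omega) h with ⟨h1, h2⟩
    simp only [Bool.or_eq_true, beq_iff_eq, PySem.Int.mod_eq_zero_iff_dvd] at hdiv
    tauto
  | case2 i h hdiv ih =>
    rw [isPrimeLoopA, dif_pos h, if_neg hdiv]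
    rw [ih (by omega)]
    simp only [Bool.or_eq_true, beq_iff_eq, PySem.Int.mod_eq_zero_iff_dvd, not_or] at hdiv
    constructor
    · intro H j hij hmod hjj
      rcases eq_or_lt_of_le hij with rfl | hlt
      · exact ⟨hdiv.1, hdiv.2⟩
      · exact H j (by omega) (by omega) hjj
    · intro H j hij hmod hjj
      exact H j (by omega) (by omega) hjj
  | case3 i h =>
    rw [isPrimeLoopA, dif_neg h]
    simp only [true_iff]
    intro j hij hmod hjj
    exfalso
    have : i * i ≤ j * j := mul_self_le_mul_self hi.le hij
    omega

-- A's isPrime on a natural number decides primality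
theorem isPrimeA_eq (k : Nat) : isPrime (k : Int) = decide (Nat.Prime k) := by
  unfold isPrime
  by_cases h1 : (k : Int) ≤ 1
  · have : ¬ Nat.Prime k := by intro hp; have := hp.two_le; omega
    simp [h1, this]
  by_cases h3 : (k : Int) ≤ 3
  · have : k = 2 ∨ k = 3 := by omega
    rcases this with rfl | rfl <;> simp <;> norm_num
  rw [if_neg h1, if_neg h3]
  have hk4 : 4 ≤ k := by omega
  by_cases hdv : 2 ∣ k ∨ 3 ∣ k
  · have hm : (PySem.Int.mod (k:Int) 2 == 0 || PySem.Int.mod (k:Int) 3 == 0) = true := by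
      simp only [Bool.or_eq_true, beq_iff_eq, PySem.Int.mod_eq_zero_iff_dvd]
      rcases hdv with h | h
      · exact Or.inl (by exact_mod_cast Int.natCast_dvd_natCast.mpr h)
      · exact Or.inr (by exact_mod_cast Int.natCast_dvd_natCast.mpr h)
    rw [if_pos hm]
    have : ¬ Nat.Prime k := by
      intro hp
      rcases hdv with h | h
      · rcases (hp.eq_one_or_self_of_dvd 2 h) with h' | h' <;> omega
      · rcases (hp.eq_one_or_self_of_dvd 3 h) with h' | h' <;> omega
    simp [this]
  rw [not_or] at hdv
  obtain ⟨hd2, hd3⟩ := hdv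
  have hm : ¬ (PySem.Int.mod (k:Int) 2 == 0 || PySem.Int.mod (k:Int) 3 == 0) = true := by
    simp only [Bool.or_eq_true, beq_iff_eq, PySem.Int.mod_eq_zero_iff_dvd, not_or]
    constructor
    · intro h; exact hd2 (by exact_mod_cast h)
    · intro h; exact hd3 (by exact_mod_cast h)
  rw [if_neg hm]
  rw [Bool.eq_iff_iff, decide_eq_true_eq, isPrimeLoopA_true_iff (k:Int) 5 (by norm_num)]
  constructor
  · -- loop clean → prime
    intro H
    by_contra hnp
    set p := k.minFac with hp_def
    have hp : p.Prime := Nat.minFac_prime (by omega)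
    have hpd : p ∣ k := Nat.minFac_dvd k
    have hsq : p * p ≤ k := by
      have := Nat.minFac_sq_le_self (by omega : 0 < k) hnp
      nlinarith [this]
    have hp2 : p ≠ 2 := by intro h; rw [h] at hpd; exact hd2 hpd
    have hp3 : p ≠ 3 := by intro h; rw [h] at hpd; exact hd3 hpd
    have hp2' : ¬ 2 ∣ p := by
      intro h; rcases hp.eq_one_or_self_of_dvd 2 h with h' | h' <;> omega
    have hp3' : ¬ 3 ∣ p := by
      intro h; rcases hp.eq_one_or_self_of_dvd 3 h with h' | h' <;> omega
    have hp5 : 5 ≤ p := by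
      have := hp.two_le
      rcases Nat.lt_or_ge p 5 with h | h
      · interval_cases p <;> simp_all <;> omega
      · exact h
    have hmod6 : p % 6 = 1 ∨ p % 6 = 5 := by omega
    rcases hmod6 with h6 | h6
    · -- j = p - 2, j + 2 = p
      have h7 : 7 ≤ p := by omega
      have hjj : ((p : Int) - 2) * ((p : Int) - 2) ≤ (k : Int) := by
        have : (p : Int) * (p : Int) ≤ (k : Int) := by exact_mod_cast hsq
        nlinarith [show (5:Int) ≤ (p:Int) by exact_mod_cast hp5]
      have := (H ((p : Int) - 2) (by omega) (by omega) hjj).2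
      apply this
      have : ((p : Int) - 2) + 2 = (p : Int) := by ring
      rw [this]
      exact_mod_cast Int.natCast_dvd_natCast.mpr hpd
    · -- j = p
      have hjj : (p : Int) * (p : Int) ≤ (k : Int) := by exact_mod_cast hsq
      exact (H (p : Int) (by omega) (by omega) hjj).1
        (by exact_mod_cast Int.natCast_dvd_natCast.mpr hpd)
  · -- prime → loop clean
    intro hp j hij hmod hjj
    have hj0 : (0 : Int) ≤ j := by omega
    set jn := j.toNat with hjn
    have hjcast : (jn : Int) = j := Int.toNat_of_nonneg hj0
    have hjn5 : 5 ≤ jn := by omega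
    have hjjn : jn * jn ≤ k := by
      have : ((jn * jn : Nat) : Int) ≤ (k : Int) := by push_cast [hjcast]; exact hjj
      exact_mod_cast this
    constructor
    · intro hdvd
      have hdn : jn ∣ k := by
        have : (jn : Int) ∣ (k : Int) := by rw [hjcast]; exact hdvd
        exact_mod_cast this
      have hlt : jn < k := by nlinarith
      exact (Nat.prime_def_lt'.mp hp).2 jn (by omega) hlt hdn
    · intro hdvd
      have hdn : (jn + 2) ∣ k := by
        have : ((jn + 2 : Nat) : Int) ∣ (k : Int) := by push_cast [hjcast]; exact hdvd
        exact_mod_cast this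
      have hlt : jn + 2 < k := by nlinarith
      exact (Nat.prime_def_lt'.mp hp).2 (jn + 2) (by omega) hlt hdn


-- B's full-range trial division on a natural number decides primality
theorem isPrimeB_eq (k : Nat) :
    (decide (1 < (k : Int)) &&
      (PySem.List.pyRange 2 (k : Int) 1).all (fun d => !(PySem.Int.mod (k : Int) d == 0)))
      = decide (Nat.Prime k) := by
  rw [Bool.eq_iff_iff]
  simp only [Bool.and_eq_true, decide_eq_true_eq, List.all_eq_true, PySem.List.mem_pyRange_one,
    Bool.not_eq_eq_eq_not, Bool.not_true, beq_eq_false_iff_ne, ne_eq]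
  constructor
  · rintro ⟨hk1, H⟩
    rw [Nat.prime_def_lt']
    refine ⟨by omega, fun mN h2 hlt hdvd => ?_⟩
    have := H (mN : Int) ⟨by omega, by omega⟩
    rw [PySem.Int.mod_eq_zero_iff_dvd] at this
    exact this (by exact_mod_cast Int.natCast_dvd_natCast.mpr hdvd)
  · intro hp
    refine ⟨by have := hp.two_le; omega, fun d ⟨hd2, hdk⟩ => ?_⟩
    rw [PySem.Int.mod_eq_zero_iff_dvd]
    intro hdvd
    have hd0 : (0:Int) ≤ d := by omega
    have hdn : d.toNat ∣ k := by
      have : ((d.toNat : Nat) : Int) ∣ (k : Int) := by rwa [Int.toNat_of_nonneg hd0]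
      exact_mod_cast this
    exact (Nat.prime_def_lt'.mp hp).2 d.toNat (by omega) (by omega) hdn

-- A's index loop over ans, characterized: appended letters and the found-flag
theorem foldA_char (l : List (Char × Int)) (acc : List Char) (e : Int) :
    l.foldl (fun st x => if isPrime x.2 = true then (st.1 ++ [x.1], 1) else st) (acc, e)
      = (acc ++ (l.filter (fun x => isPrime x.2)).map (·.1),
         if (l.filter (fun x => isPrime x.2)).isEmpty then e else 1) := by
  induction l generalizing acc e with
  | nil => simp
  | cons x xs ih =>
    simp only [List.foldl_cons]
    by_cases h : isPrime x.2 = true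
    · rw [List.filter_cons_of_pos (by simpa using h)]; simp [h, ih]
    · rw [List.filter_cons_of_neg (by simpa using h)]; simp [h, ih]


theorem primefreq_eq (m : String) : primefreq m = primefreq_alt m := by
  unfold primefreq primefreq_alt
  dsimp only
  have hfold := PySem.List.foldl_pyRange_zero_pyGetD'
    ((PySem.Dict.counter m.toList).keys.map
      (fun letter => (letter, (PySem.Dict.counter m.toList).getD letter 0)))
    (' ', 0)
    (fun (st : List Char × Int) x => if isPrime x.2 = true then (st.1 ++ [x.1], 1) else st)
    (([], 0) : List Char × Int)
  simp only [hfold]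
  rw [foldA_char]
  simp only [List.filter_map, List.map_map]
  simp only [Function.comp_def, List.nil_append]
  have hpred : ∀ ch : Char,
      (decide (1 < (PySem.Dict.counter m.toList).getD ch 0) &&
        (PySem.List.pyRange 2 ((PySem.Dict.counter m.toList).getD ch 0) 1).all
          (fun d => !(PySem.Int.mod ((PySem.Dict.counter m.toList).getD ch 0) d == 0)))
        = isPrime ((PySem.Dict.counter m.toList).getD ch 0) := by
    intro ch
    rw [PySem.Dict.getD_counter, isPrimeA_eq, isPrimeB_eq]
  have hsorted : PySem.List.sorted
        ((PySem.Dict.counter m.toList).keys.filter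
          (fun ch => isPrime ((PySem.Dict.counter m.toList).getD ch 0))) (fun x => x) false
      = (PySem.List.sorted (PySem.Dict.counter m.toList).keys (fun x => x) false).filter
          (fun ch => isPrime ((PySem.Dict.counter m.toList).getD ch 0)) := by
    apply PySem.List.sorted_eq_of_perm_of_pairwise_lt
    · exact (PySem.List.sorted_perm _ _ _).filter _
    · rw [PySem.Dict.keys_counter]
      exact List.Pairwise.filter _ (PySem.List.sorted_ofList_pairwise_lt _)
  simp only [hpred, List.map_id', List.isEmpty_map]
  rw [← hsorted]
  by_cases hF : (List.filter (fun ch => isPrime ((PySem.Dict.counter m.toList).getD ch 0))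
      (PySem.Dict.counter m.toList).keys).isEmpty = true
  · rw [List.isEmpty_iff] at hF
    rw [hF]
    simp [PySem.List.sorted_eq_nil_iff]
  · have hright : ¬ (PySem.List.sorted
        ((PySem.Dict.counter m.toList).keys.filter
          (fun ch => isPrime ((PySem.Dict.counter m.toList).getD ch 0))) (fun x => x) false).isEmpty = true := by
      rw [List.isEmpty_iff, PySem.List.sorted_eq_nil_iff]
      rw [List.isEmpty_iff] at hF
      exact hF
    rw [if_neg hF, if_neg hright, if_neg (show ¬ (((1:Int) == 0) = true) by decide)]

-- ===== VERDICT (by name: the statement is the Claim_ definition above) =====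
theorem primefreq_spec : Claim_equal_primefreq := by
  unfold Claim_equal_primefreq Spec_primefreq
  intro m _
  exact primefreq_eq m
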